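-- pv_equiv track=rewrite | github.com/thanakorn1999/test | test_function.py | get_xy_from_distances_x_y
-- ===== SOURCE A (Python) =====
-- def get_xy_from_distances_x_y(distances_x_y):
--     Y,X=[],[]
--     distances=[]
--     for list_disxy in distances_x_y:
--         if list_disxy ==[]:
--             continue
--         for dis,x,y in list_disxy :
--             X.append(x)
--             Y.append(y)
--             distances.append(dis)
--     return X,Y,distances
-- ===== SOURCE B (Python) =====
-- def get_xy_from_distances_x_y(distances_x_y):
--     triples = [(dis, x, y) for list_disxy in distances_x_y for dis, x, y in list_disxy]
--     if not triples:
--         return [], [], []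
--     diss, xs, ys = zip(*triples)
--     return list(xs), list(ys), list(diss)
-- ===== Notes on version B (the rewrite author's own statement) =====
-- stated objective: idiomatic
-- what changed: Replaces the nested loops with three per-column appends by a single flatten comprehension followed by one zip(*) transpose into the three columns.
import Mathlib
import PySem

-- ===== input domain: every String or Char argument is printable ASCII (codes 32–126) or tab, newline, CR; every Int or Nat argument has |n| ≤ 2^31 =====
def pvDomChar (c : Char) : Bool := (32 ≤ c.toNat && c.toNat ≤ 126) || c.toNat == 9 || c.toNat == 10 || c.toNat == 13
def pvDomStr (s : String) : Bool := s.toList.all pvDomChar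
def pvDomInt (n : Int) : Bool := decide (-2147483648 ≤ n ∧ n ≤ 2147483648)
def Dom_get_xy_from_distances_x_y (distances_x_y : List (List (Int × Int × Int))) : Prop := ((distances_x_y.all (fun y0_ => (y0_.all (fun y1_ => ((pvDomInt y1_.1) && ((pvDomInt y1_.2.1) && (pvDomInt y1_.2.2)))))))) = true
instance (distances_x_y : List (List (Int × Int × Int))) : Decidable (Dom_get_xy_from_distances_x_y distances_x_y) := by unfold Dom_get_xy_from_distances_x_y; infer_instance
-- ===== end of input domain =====

-- ===== PORT A =====
def get_xy_from_distances_x_y (distances_x_y : List (List (Int × Int × Int))) : List Int × List Int × List Int :=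
  let r := distances_x_y.foldl
    (fun (st : List Int × List Int × List Int) list_disxy =>
      if list_disxy = [] then st
      else list_disxy.foldl
        (fun (st2 : List Int × List Int × List Int) t =>
          (st2.1 ++ [t.2.1], st2.2.1 ++ [t.2.2], st2.2.2 ++ [t.1])) st)
    ([], [], [])
  (r.1, r.2.1, r.2.2)

-- ===== PORT B =====
-- B: flatten once, then transpose into the three columns (empty case returns ([],[],[])).
def get_xy_from_distances_x_y_alt (distances_x_y : List (List (Int × Int × Int))) : List Int × List Int × List Int :=
  let triples := distances_x_y.flatMap (fun l => l)
  if triples = [] then ([], [], [])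
  else (triples.map (fun t => t.2.1), triples.map (fun t => t.2.2), triples.map (fun t => t.1))

-- ===== PRECONDITION & SPEC =====
def Spec_get_xy_from_distances_x_y (distances_x_y : List (List (Int × Int × Int))) (out : List Int × List Int × List Int) : Prop := out = get_xy_from_distances_x_y_alt distances_x_y
instance (distances_x_y : List (List (Int × Int × Int))) (out : List Int × List Int × List Int) : Decidable (Spec_get_xy_from_distances_x_y distances_x_y out) := by unfold Spec_get_xy_from_distances_x_y; infer_instance

-- ===== CLAIM (what is proved, stated in full; the proofs are below) =====
def Claim_equal_get_xy_from_distances_x_y : Prop := ∀ (distances_x_y : List (List (Int × Int × Int))), Dom_get_xy_from_distances_x_y distances_x_y → Spec_get_xy_from_distances_x_y distances_x_y (get_xy_from_distances_x_y distances_x_y)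

-- ===== LEMMAS AND PROOFS =====

lemma inner_foldl (xs : List (Int × Int × Int)) (acc : List Int × List Int × List Int) :
    xs.foldl (fun (st2 : List Int × List Int × List Int) t =>
      (st2.1 ++ [t.2.1], st2.2.1 ++ [t.2.2], st2.2.2 ++ [t.1])) acc
    = (acc.1 ++ xs.map (fun t => t.2.1), acc.2.1 ++ xs.map (fun t => t.2.2),
       acc.2.2 ++ xs.map (fun t => t.1)) := by
  induction xs generalizing acc with
  | nil => simp
  | cons h t ih => simp [ih]

lemma outer_foldl (l : List (List (Int × Int × Int))) (acc : List Int × List Int × List Int) :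
    l.foldl (fun (st : List Int × List Int × List Int) list_disxy =>
      if list_disxy = [] then st
      else list_disxy.foldl (fun (st2 : List Int × List Int × List Int) t =>
        (st2.1 ++ [t.2.1], st2.2.1 ++ [t.2.2], st2.2.2 ++ [t.1])) st) acc
    = (acc.1 ++ (l.flatMap (fun x => x)).map (fun t => t.2.1),
       acc.2.1 ++ (l.flatMap (fun x => x)).map (fun t => t.2.2),
       acc.2.2 ++ (l.flatMap (fun x => x)).map (fun t => t.1)) := by
  induction l generalizing acc with
  | nil => simp
  | cons h t ih =>
    by_cases hh : h = []
    · subst hh; simp [ih]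
    · rw [List.foldl_cons, if_neg hh, inner_foldl, ih]; simp

-- ===== VERDICT (by name: the statement is the Claim_ definition above) =====
theorem get_xy_from_distances_x_y_spec : Claim_equal_get_xy_from_distances_x_y := by
  intro l _
  unfold Spec_get_xy_from_distances_x_y get_xy_from_distances_x_y get_xy_from_distances_x_y_alt
  simp only [outer_foldl, List.nil_append]
  by_cases h : l.flatMap (fun x => x) = [] <;> simp [h]
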